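-- pv_equiv track=rewrite | github.com/Davinchi1352/project_BuchSchopferv2 | app/services/docx_exporter.py | _process_chapter_content
-- ===== SOURCE A (Python) =====
-- def _process_chapter_content(content):
--     """
--     Procesa el contenido del capítulo para separar encabezados y párrafos.
--
--     Args:
--         content: Texto del capítulo
--
--     Returns:
--         Lista de tuplas (tipo, texto) donde tipo puede ser 'heading' o 'paragraph'
--     """
--     processed_content = []
--
--     # Dividir el contenido por líneas
--     lines = content.strip().split("\n")
--
--     i = 0
--     while i < len(lines):
--         current_line = lines[i].strip()
--
--         # Saltar líneas vacías
--         if not current_line: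
--             i += 1
--             continue
--
--         # Detectar si es un posible encabezado
--         is_heading = (
--             current_line and
--             len(current_line) < 80 and
--             not current_line.endswith('.') and
--             (i == 0 or not lines[i-1].strip()) and
--             (i == len(lines)-1 or not lines[i+1].strip() or len(lines[i+1].strip()) > 150)
--         )
--
--         if is_heading:
--             processed_content.append(('heading', current_line))
--             i += 1
--         else:
--             # Recolectar párrafo (líneas consecutivas que no están vacías)
--             paragraph_lines = [current_line]
--             j = i + 1
--             while j < len(lines) and lines[j].strip():
--                 paragraph_lines.append(lines[j].strip())
--                 j += 1
--
--             paragraph_text = ' '.join(paragraph_lines)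
--             processed_content.append(('paragraph', paragraph_text))
--             i = j
--
--     return processed_content
-- ===== SOURCE B (Python) =====
-- def _process_chapter_content(content):
--     lines = content.strip().split("\n")
--     # Phase 1: segment into blocks of consecutive non-blank (stripped) lines.
--     blocks = []
--     cur = []
--     for line in lines:
--         s = line.strip()
--         if s:
--             cur.append(s)
--         else:
--             if cur:
--                 blocks.append(cur)
--                 cur = []
--     if cur:
--         blocks.append(cur)
--     # Phase 2: classify each block independently.
--     out = []
--     for b in blocks:
--         first = b[0]
--         if len(first) < 80 and not first.endswith('.') and (len(b) == 1 or len(b[1]) > 150):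
--             out.append(('heading', first))
--             if len(b) > 1:
--                 out.append(('paragraph', ' '.join(b[1:])))
--         else:
--             out.append(('paragraph', ' '.join(b)))
--     return out
-- ===== Notes on version B (the rewrite author's own statement) =====
-- stated objective: alternative
-- what changed: Replaces A's single advancing while-loop state machine (index arithmetic with prev/next lookahead and an inner paragraph-collecting loop) by a two-phase pass: first segment the stripped lines into blocks of consecutive non-blank lines, then classify each block independently as heading(+rest paragraph) or paragraph.
import Mathlib
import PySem

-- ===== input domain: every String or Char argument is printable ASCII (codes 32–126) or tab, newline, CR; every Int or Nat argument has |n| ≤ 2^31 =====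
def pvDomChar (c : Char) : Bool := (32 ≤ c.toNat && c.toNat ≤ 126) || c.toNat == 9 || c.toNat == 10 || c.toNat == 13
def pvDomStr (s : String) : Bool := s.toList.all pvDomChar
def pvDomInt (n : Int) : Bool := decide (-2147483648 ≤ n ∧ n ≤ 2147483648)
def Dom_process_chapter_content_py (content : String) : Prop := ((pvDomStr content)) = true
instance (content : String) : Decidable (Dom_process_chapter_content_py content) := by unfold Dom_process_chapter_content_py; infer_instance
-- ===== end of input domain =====

-- B replaces A's advancing while-loop state machine by a segment-into-blocks-then-classify
-- two-phase pass (alternative decomposition, same cost).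

-- ===== PORT A =====
-- inner loop of A: collect the stripped consecutive non-blank lines and return the remaining suffix
def pvCollectA : List (List Char) → List (List Char) × List (List Char)
  | [] => ([], [])
  | l :: ls =>
    if (PySem.Chars.strip l).isEmpty then ([], l :: ls)
    else
      let pr := pvCollectA ls
      (PySem.Chars.strip l :: pr.1, pr.2)

-- needed by pvLoopA's termination: the returned suffix is no longer than the input
theorem pvCollectA_rest_len (ls : List (List Char)) : (pvCollectA ls).2.length ≤ ls.length := by
  induction ls with
  | nil => simp [pvCollectA]
  | cons l ls ih =>
    simp only [pvCollectA]
    split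
    · simp
    · simpa using Nat.le_succ_of_le ih

-- A's lookahead `i == len(lines)-1 or not lines[i+1].strip() or len(lines[i+1].strip()) > 150`
def pvLookahead : List (List Char) → Bool
  | [] => true
  | m :: _ => (PySem.Chars.strip m).isEmpty || decide (150 < (PySem.Chars.strip m).length)

-- A's while loop; prevBlank carries the value of `i == 0 or not lines[i-1].strip()`
def pvLoopA (prevBlank : Bool) (lines : List (List Char)) : List (String × String) :=
  match lines with
  | [] => []
  | l :: ls =>
    let cur := PySem.Chars.strip l
    if cur.isEmpty then pvLoopA true ls
    else if cur.length < 80 && !(PySem.Chars.endswith cur ['.']) && prevBlank && pvLookahead ls then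
      ("heading", String.ofList cur) :: pvLoopA false ls
    else
      let pr := pvCollectA ls
      ("paragraph", String.ofList (PySem.Chars.join [' '] (cur :: pr.1))) :: pvLoopA false pr.2
termination_by lines.length
decreasing_by
  · simp
  · simp
  · exact Nat.lt_succ_of_le (pvCollectA_rest_len ls)

def process_chapter_content_py (content : String) : List (String × String) :=
  pvLoopA true (PySem.Chars.splitOn (PySem.Chars.strip content.toList) ['\n'])

-- ===== PORT B =====
-- phase 1 step: accumulate (finished blocks, current block of stripped non-blank lines)
def pvBlkStep (acc : List (List (List Char)) × List (List Char)) (line : List Char) :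
    List (List (List Char)) × List (List Char) :=
  let s := PySem.Chars.strip line
  if !s.isEmpty then (acc.1, acc.2 ++ [s])
  else if !acc.2.isEmpty then (acc.1 ++ [acc.2], [])
  else acc

def pvBlocks (lines : List (List Char)) : List (List (List Char)) :=
  let acc := lines.foldl pvBlkStep ([], [])
  if acc.2.isEmpty then acc.1 else acc.1 ++ [acc.2]

-- B's heading test `len(b) == 1 or len(b[1]) > 150` applied to the tail of the block
def pvSecondOK : List (List Char) → Bool
  | [] => true
  | q :: _ => decide (150 < q.length)

-- phase 2: classify one block
def pvClassify (b : List (List Char)) : List (String × String) :=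
  match b with
  | [] => []
  | first :: rest =>
    if first.length < 80 && !(PySem.Chars.endswith first ['.']) && pvSecondOK rest then
      ("heading", String.ofList first) ::
        (match rest with
         | [] => []
         | _ :: _ => [("paragraph", String.ofList (PySem.Chars.join [' '] rest))])
    else [("paragraph", String.ofList (PySem.Chars.join [' '] b))]

def process_chapter_content_py_alt (content : String) : List (String × String) :=
  (pvBlocks (PySem.Chars.splitOn (PySem.Chars.strip content.toList) ['\n'])).flatMap pvClassify

-- ===== PRECONDITION & SPEC =====
def Spec_process_chapter_content_py (content : String) (out : List (String × String)) : Prop := out = process_chapter_content_py_alt content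
instance (content : String) (out : List (String × String)) : Decidable (Spec_process_chapter_content_py content out) := by unfold Spec_process_chapter_content_py; infer_instance

-- ===== CLAIM (what is proved, stated in full; the proofs are below) =====
def Claim_equal_process_chapter_content_py : Prop := ∀ (content : String), Dom_process_chapter_content_py content → Spec_process_chapter_content_py content (process_chapter_content_py content)

-- ===== LEMMAS AND PROOFS =====

-- recursive characterization of phase 1
def pvBlocksAux (cur : List (List Char)) : List (List Char) → List (List (List Char))
  | [] => if cur.isEmpty then [] else [cur]
  | l :: ls =>
    let s := PySem.Chars.strip l
    if !s.isEmpty then pvBlocksAux (cur ++ [s]) ls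
    else if !cur.isEmpty then cur :: pvBlocksAux [] ls
    else pvBlocksAux [] ls

theorem pvBlocks_eq_aux (ls : List (List Char)) (bs : List (List (List Char))) (cur : List (List Char)) :
    (let acc := ls.foldl pvBlkStep (bs, cur);
     if acc.2.isEmpty then acc.1 else acc.1 ++ [acc.2]) = bs ++ pvBlocksAux cur ls := by
  induction ls generalizing bs cur with
  | nil =>
    simp only [List.foldl_nil, pvBlocksAux]
    split <;> simp_all
  | cons l ls ih =>
    simp only [List.foldl_cons, pvBlkStep, pvBlocksAux]
    split
    · exact ih bs (cur ++ [PySem.Chars.strip l])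
    · split
      · simpa using ih (bs ++ [cur]) []
      · rename_i h1 h2
        have hc : cur = [] := by simpa using h2
        subst hc; exact ih bs []

theorem pvBlocksAux_ne (cur : List (List Char)) (h : ¬ cur.isEmpty) (ls : List (List Char)) :
    pvBlocksAux cur ls = (cur ++ (pvCollectA ls).1) :: pvBlocksAux [] (pvCollectA ls).2 := by
  induction ls generalizing cur with
  | nil => simp [pvBlocksAux, pvCollectA, h]
  | cons l ls ih =>
    simp only [pvBlocksAux, pvCollectA]
    by_cases hs : (PySem.Chars.strip l).isEmpty
    · simp only [hs, Bool.not_true, Bool.false_eq_true, ite_false, h, Bool.not_false, ite_true]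
      simp only [pvBlocksAux]
      simp [hs, h]
    · simp only [hs, Bool.not_false, ite_true]
      rw [ih (cur ++ [PySem.Chars.strip l]) (by simp)]
      simp

-- the suffix pvCollectA returns is empty or starts with a blank line
theorem pvCollectA_rest_blank (ls : List (List Char)) :
    (pvCollectA ls).2 = [] ∨
      ∃ x xs, (pvCollectA ls).2 = x :: xs ∧ (PySem.Chars.strip x).isEmpty := by
  induction ls with
  | nil => left; simp [pvCollectA]
  | cons l ls ih =>
    simp only [pvCollectA]
    by_cases hs : (PySem.Chars.strip l).isEmpty
    · right; exact ⟨l, ls, by simp [hs], hs⟩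
    · simpa [hs] using ih

-- prevBlank is irrelevant when the list is empty or starts with a blank line
theorem pvLoopA_false_eq_true (r : List (List Char))
    (h : r = [] ∨ ∃ x xs, r = x :: xs ∧ (PySem.Chars.strip x).isEmpty) :
    pvLoopA false r = pvLoopA true r := by
  rcases h with h | ⟨x, xs, rfl, hx⟩
  · subst h; rw [pvLoopA.eq_def, pvLoopA.eq_def]
  · rw [pvLoopA.eq_def, pvLoopA.eq_def]; simp [hx]

theorem pvMain (n : Nat) : ∀ ls : List (List Char), ls.length ≤ n →
    pvLoopA true ls = (pvBlocksAux [] ls).flatMap pvClassify := by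
  induction n with
  | zero =>
    intro ls h
    have : ls = [] := List.eq_nil_of_length_eq_zero (Nat.le_zero.mp h)
    subst this; rw [pvLoopA.eq_def]; rfl
  | succ n ih =>
    intro ls hlen
    cases ls with
    | nil => rw [pvLoopA.eq_def]; rfl
    | cons l ls =>
      have hlen' : ls.length ≤ n := by simpa using hlen
      by_cases hb : (PySem.Chars.strip l).isEmpty
      · rw [pvLoopA.eq_def]
        simp only [hb, ite_true, pvBlocksAux, Bool.not_true]
        simpa [hb] using ih ls hlen'
      · -- non-blank first line: it starts the block (PySem.Chars.strip l) :: p with remainder r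
        obtain ⟨p, r, hpr⟩ : ∃ p r, pvCollectA ls = (p, r) := ⟨_, _, rfl⟩
        have hp : p = (pvCollectA ls).1 := by rw [hpr]
        have hr : r = (pvCollectA ls).2 := by rw [hpr]
        have hrlen : r.length ≤ n := le_trans (hr ▸ pvCollectA_rest_len ls) hlen'
        have hrblank : r = [] ∨ ∃ x xs, r = x :: xs ∧ (PySem.Chars.strip x).isEmpty :=
          hr ▸ pvCollectA_rest_blank ls
        have haux : pvBlocksAux [] (l :: ls) = ((PySem.Chars.strip l) :: p) :: pvBlocksAux [] r := by
          simp only [pvBlocksAux, hb, Bool.not_false, ite_true]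
          rw [show ([] ++ [(PySem.Chars.strip l)] : List (List Char)) = [(PySem.Chars.strip l)] from rfl,
            pvBlocksAux_ne [(PySem.Chars.strip l)] (by simp) ls]
          simp [hpr]
        -- the lookahead condition of A equals B's condition on the tail of the block
        have hcond : pvLookahead ls = pvSecondOK p := by
          rw [hp]
          cases ls with
          | nil => simp [pvCollectA, pvLookahead, pvSecondOK]
          | cons m ms =>
            by_cases hm : (PySem.Chars.strip m).isEmpty
            · simp [pvCollectA, pvLookahead, pvSecondOK, hm]
            · simp [pvCollectA, pvLookahead, pvSecondOK, hm]
        have hcont : pvLoopA false r = (pvBlocksAux [] r).flatMap pvClassify := by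
          rw [pvLoopA_false_eq_true r hrblank]
          exact ih r hrlen
        rw [haux]
        by_cases hH : ((PySem.Chars.strip l).length < 80 && !(PySem.Chars.endswith (PySem.Chars.strip l) ['.']) && pvSecondOK p) = true
        · -- heading case
          rw [pvLoopA.eq_def]; dsimp only
          rw [if_neg (by simpa using hb), if_pos (by rw [hcond]; simpa using hH)]
          cases p with
          | nil =>
            -- single-line block
            simp only [List.flatMap_cons, pvClassify]
            rw [if_pos (by simpa using hH)]
            cases ls with
            | nil =>
              have hrnil : r = [] := by simpa [pvCollectA] using hr
              subst hrnil
              rw [pvLoopA.eq_def]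
              simp [pvBlocksAux]
            | cons m ms =>
              have hm : (PySem.Chars.strip m).isEmpty := by
                by_contra hm
                simp [pvCollectA, hm] at hp
              have hrval : r = m :: ms := by simpa [pvCollectA, hm] using hr
              subst hrval
              rw [pvLoopA.eq_def]
              simp only [hm, ite_true]
              have hbl : pvBlocksAux [] (m :: ms) = pvBlocksAux [] ms := by
                simp [pvBlocksAux, hm]
              rw [hbl]
              have := ih ms (by simp at hlen'; omega)
              simp [this]
          | cons q qs =>
            -- multi-line block: the rest of the block is one paragraph
            have hlsne : ∃ m ms, ls = m :: ms ∧ ¬ (PySem.Chars.strip m).isEmpty ∧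
                pvCollectA ms = (qs, r) ∧ PySem.Chars.strip m = q := by
              cases ls with
              | nil => simp [pvCollectA] at hp
              | cons m ms =>
                by_cases hm : (PySem.Chars.strip m).isEmpty
                · simp [pvCollectA, hm] at hp
                · refine ⟨m, ms, rfl, hm, ?_, ?_⟩
                  · have h1 : qs = (pvCollectA ms).1 := by
                      have := hp
                      simp [pvCollectA, hm] at this
                      exact this.2
                    have h2 : r = (pvCollectA ms).2 := by
                      simpa [pvCollectA, hm] using hr
                    rw [h1, h2]
                  · have := hp
                    simp [pvCollectA, hm] at this
                    exact this.1.symm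
            obtain ⟨m, ms, rfl, hm, hms, hq⟩ := hlsne
            rw [pvLoopA.eq_def]; dsimp only
            rw [if_neg (by simpa using hm)]
            rw [if_neg (by simp)]
            simp only [hms]
            simp only [List.flatMap_cons, pvClassify]
            rw [if_pos (by simpa using hH)]
            simp [hcont, hq]
        · -- paragraph case
          rw [pvLoopA.eq_def]; dsimp only
          rw [if_neg (by simpa using hb), if_neg (by rw [hcond]; simpa using hH)]
          simp only [hpr]
          simp only [List.flatMap_cons, pvClassify]
          rw [if_neg (by simpa using hH)]
          simp [hcont]

-- ===== VERDICT (by name: the statement is the Claim_ definition above) =====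
theorem process_chapter_content_py_spec : Claim_equal_process_chapter_content_py := by
  intro content _
  unfold Spec_process_chapter_content_py process_chapter_content_py process_chapter_content_py_alt pvBlocks
  rw [pvMain (PySem.Chars.splitOn (PySem.Chars.strip content.toList) ['\n']).length _ le_rfl]
  rw [pvBlocks_eq_aux]
  simp
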